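-- pv_equiv track=rewrite | github.com/hannahghub123/LeetCode-Workouts | problems/strings_with_equal_operations.py | strings_with_equal_operations
-- ===== SOURCE A (Python) =====
-- def strings_with_equal_operations(s1,s2):
--     n=len(s1)
--     s1=list(s1)
--     demo_s1=list(s1)
--     if s1==s2:
--         return True
--     else:
--
--
--         for i in range(n//2):
--             j=2+i
--             if j<len(s1):
--                 s1[i],s1[j]=s1[j],s1[i]
--
--             if ''.join(s1)==s2:
--                 return True
--
--         s1=demo_s1
--
--         for i in range(n-1,n//2,-1):
--             j=i-2
--             if j<len(s1):
--                 s1[i],s1[j]=s1[j],s1[i]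
--
--             if ''.join(s1)==s2:
--                 return True
--
--     return False
-- ===== SOURCE B (Python) =====
-- def strings_with_equal_operations(s1, s2):
--     n = len(s1)
--     if len(s2) != n:
--         return False
--     a = list(s1)
--     t = list(s2)
--     mism0 = sum(1 for x, y in zip(a, t) if x != y)
--     mism = mism0
--     for i in range(n // 2):
--         j = 2 + i
--         if j < n:
--             mism -= (a[i] != t[i]) + (a[j] != t[j])
--             a[i], a[j] = a[j], a[i]
--             mism += (a[i] != t[i]) + (a[j] != t[j])
--         if mism == 0:
--             return True
--     a = list(s1)
--     mism = mism0
--     for i in range(n - 1, n // 2, -1):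
--         j = i - 2
--         mism -= (a[i] != t[i]) + (a[j] != t[j])
--         a[i], a[j] = a[j], a[i]
--         mism += (a[i] != t[i]) + (a[j] != t[j])
--         if mism == 0:
--             return True
--     return False
-- ===== Notes on version B (the rewrite author's own statement) =====
-- stated objective: faster
-- what changed: B keeps an incremental mismatch count between the working list and s2, updating only the two swapped positions per step and testing count==0, instead of A's per-step ''.join and full-string comparison; unequal lengths are rejected up front.
import Mathlib
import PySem

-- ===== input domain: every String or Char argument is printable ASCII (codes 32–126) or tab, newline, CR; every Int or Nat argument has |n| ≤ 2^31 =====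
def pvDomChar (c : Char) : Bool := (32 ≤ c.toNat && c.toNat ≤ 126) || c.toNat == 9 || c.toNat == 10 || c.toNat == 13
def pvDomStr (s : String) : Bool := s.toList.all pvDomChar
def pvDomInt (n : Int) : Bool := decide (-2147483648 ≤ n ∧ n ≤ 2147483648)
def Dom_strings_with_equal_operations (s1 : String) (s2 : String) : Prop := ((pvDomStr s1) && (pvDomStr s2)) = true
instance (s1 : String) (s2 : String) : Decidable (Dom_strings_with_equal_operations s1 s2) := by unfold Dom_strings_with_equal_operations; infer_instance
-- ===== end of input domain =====

-- B replaces A's per-step ''.join + full-string comparison by an incrementally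
-- maintained mismatch count (objective: faster, O(n) vs O(n^2)).

-- ===== PORT A =====

-- Python's simultaneous `s1[i],s1[j] = s1[j],s1[i]`: both right-hand sides are read
-- from the ORIGINAL list before either write (exact also for i = j).
def pySwap (a : List Char) (i j : Nat) : List Char :=
  (a.set i (a.getD j ' ')).set j (a.getD i ' ')

-- one of A's two loops, run over its list of (i, j) index pairs; each step:
-- `if j < len(s1): swap`, then `if ''.join(s1) == s2: return True`
def loopA (s2 : String) : List (Nat × Nat) → List Char → Bool
  | [], _ => false
  | (i, j) :: rest, a =>
    let a' := if j < a.length then pySwap a i j else a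
    if String.ofList a' == s2 then true else loopA s2 rest a'

def strings_with_equal_operations (s1 : String) (s2 : String) : Bool :=
  let a := s1.toList          -- s1 = list(s1)  (demo_s1 is another copy of it)
  let n := a.length
  -- Python's `if s1 == s2` compares a LIST with a STRING: it is always False,
  -- so control always falls through to the two loops.
  if loopA s2 ((List.range (n / 2)).map (fun i => (i, 2 + i))) a then true
  else
    -- range(n-1, n//2, -1); every element x of this range has 2 ≤ x, so
    -- Int.toNat and the Nat subtraction `x.toNat - 2` are exact here
    loopA s2 ((PySem.List.pyRange ((n : Int) - 1) (PySem.Int.floordiv (n : Int) 2) (-1)).map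
      (fun x => (x.toNat, x.toNat - 2))) a

-- ===== PORT B =====

-- (a[k] != t[k]) as the 0/1 integer Python adds to/subtracts from mism;
-- every call site has k < a.length = t.length, so getD is exact
def mismAt (t : List Char) (a : List Char) (k : Nat) : Int :=
  if a.getD k ' ' ≠ t.getD k ' ' then 1 else 0

-- mism0 = sum(1 for x, y in zip(a, t) if x != y)
def mism0 (a : List Char) (t : List Char) : Int :=
  ((a.zip t).map (fun p => if p.1 ≠ p.2 then (1 : Int) else 0)).sum

-- B's first loop: guarded swap, mismatch count updated only at i and j
def loopB1 (t : List Char) (n : Nat) : List Nat → List Char → Int → Bool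
  | [], _, _ => false
  | i :: rest, a, m =>
    let j := 2 + i
    if j < n then
      let a' := pySwap a i j
      let m' := m - mismAt t a i - mismAt t a j + mismAt t a' i + mismAt t a' j
      if m' == 0 then true else loopB1 t n rest a' m'
    else
      if m == 0 then true else loopB1 t n rest a m

-- B's second loop: j = i - 2, unconditional swap
def loopB2 (t : List Char) : List Nat → List Char → Int → Bool
  | [], _, _ => false
  | i :: rest, a, m =>
    let j := i - 2
    let a' := pySwap a i j
    let m' := m - mismAt t a i - mismAt t a j + mismAt t a' i + mismAt t a' j
    if m' == 0 then true else loopB2 t rest a' m'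

def strings_with_equal_operations_alt (s1 : String) (s2 : String) : Bool :=
  let a := s1.toList
  let t := s2.toList
  let n := a.length
  if t.length ≠ n then false
  else
    let m0 := mism0 a t
    if loopB1 t n (List.range (n / 2)) a m0 then true
    else
      -- range(n-1, n//2, -1); every element is ≥ 2, so Int.toNat is exact here
      loopB2 t ((PySem.List.pyRange ((n : Int) - 1) (PySem.Int.floordiv (n : Int) 2) (-1)).map Int.toNat) a m0

-- ===== PRECONDITION & SPEC =====
def Spec_strings_with_equal_operations (s1 : String) (s2 : String) (out : Bool) : Prop := out = strings_with_equal_operations_alt s1 s2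
instance (s1 : String) (s2 : String) (out : Bool) : Decidable (Spec_strings_with_equal_operations s1 s2 out) := by unfold Spec_strings_with_equal_operations; infer_instance

-- ===== CLAIM (what is proved, stated in full; the proofs are below) =====
def Claim_equal_strings_with_equal_operations : Prop := ∀ (s1 : String) (s2 : String), Dom_strings_with_equal_operations s1 s2 → Spec_strings_with_equal_operations s1 s2 (strings_with_equal_operations s1 s2)

-- ===== LEMMAS AND PROOFS =====

theorem length_pySwap (a : List Char) (i j : Nat) : (pySwap a i j).length = a.length := by
  simp [pySwap]

theorem getD_pySwap_ne (a : List Char) (i j k : Nat) (hki : k ≠ i) (hkj : k ≠ j) :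
    (pySwap a i j).getD k ' ' = a.getD k ' ' := by
  simp [pySwap, List.getD, List.getElem?_set_ne (Ne.symm hkj), List.getElem?_set_ne (Ne.symm hki)]

-- mism0 as a sum of per-position indicators
theorem mism0_eq_sum (a t : List Char) (n : Nat) (ha : a.length = n) (ht : t.length = n) :
    mism0 a t = ∑ k ∈ Finset.range n, mismAt t a k := by
  induction a generalizing t n with
  | nil =>
    simp only [List.length_nil] at ha
    subst ha; simp [mism0]
  | cons c a ih =>
    cases t with
    | nil => simp only [List.length_nil] at ht; simp only [List.length_cons] at ha; omega
    | cons d t =>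
      simp only [List.length_cons] at ha ht
      subst ha
      rw [Finset.sum_range_succ']
      simp only [mism0, List.zip_cons_cons, List.map_cons, List.sum_cons]
      have hih := ih t a.length rfl (by omega)
      simp only [mism0] at hih
      rw [hih]
      have h2 : ∀ k, mismAt (d :: t) (c :: a) (k + 1) = mismAt t a k := by
        intro k; simp [mismAt]
      simp only [h2]
      simp [mismAt, add_comm]

theorem mism0_nonneg (a t : List Char) : 0 ≤ mism0 a t := by
  unfold mism0
  apply List.sum_nonneg
  intro x hx
  simp only [List.mem_map] at hx
  obtain ⟨p, _, rfl⟩ := hx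
  split <;> norm_num

theorem mism0_eq_zero_iff (a t : List Char) (h : a.length = t.length) :
    (mism0 a t = 0) ↔ a = t := by
  induction a generalizing t with
  | nil =>
    cases t with
    | nil => simp [mism0]
    | cons d t => simp at h
  | cons c a ih =>
    cases t with
    | nil => simp at h
    | cons d t =>
      simp only [List.length_cons, Nat.add_right_cancel_iff] at h
      have h1 : mism0 (c :: a) (d :: t) = (if c ≠ d then (1:Int) else 0) + mism0 a t := by
        simp [mism0]
      have h2 := mism0_nonneg a t
      by_cases hcd : c = d
      · subst hcd
        rw [h1]; simp [ih t h]
      · rw [h1]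
        simp only [hcd, ne_eq, not_false_iff, if_true]
        constructor
        · intro h0; linarith
        · intro heq; injection heq with h3 _; exact absurd h3 hcd

-- the incremental update is exactly the new mismatch count
theorem mism0_pySwap (a t : List Char) (n i j : Nat) (ha : a.length = n) (ht : t.length = n)
    (hi : i < n) (hj : j < n) (hij : i ≠ j) :
    mism0 (pySwap a i j) t =
      mism0 a t - mismAt t a i - mismAt t a j
        + mismAt t (pySwap a i j) i + mismAt t (pySwap a i j) j := by
  rw [mism0_eq_sum a t n ha ht,
      mism0_eq_sum (pySwap a i j) t n (by rw [length_pySwap]; exact ha) ht]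
  have hi' : i ∈ Finset.range n := Finset.mem_range.mpr hi
  have hj' : j ∈ (Finset.range n).erase i := Finset.mem_erase.mpr ⟨Ne.symm hij, Finset.mem_range.mpr hj⟩
  rw [← Finset.add_sum_erase _ _ hi', ← Finset.add_sum_erase _ _ hj',
      ← Finset.add_sum_erase _ (fun k => mismAt t a k) hi',
      ← Finset.add_sum_erase _ (fun k => mismAt t a k) hj']
  have hrest : ∑ k ∈ ((Finset.range n).erase i).erase j, mismAt t (pySwap a i j) k
      = ∑ k ∈ ((Finset.range n).erase i).erase j, mismAt t a k := by
    apply Finset.sum_congr rfl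
    intro k hk
    have hkj : k ≠ j := (Finset.mem_erase.mp hk).1
    have hki : k ≠ i := (Finset.mem_erase.mp (Finset.mem_erase.mp hk).2).1
    unfold mismAt
    rw [getD_pySwap_ne a i j k hki hkj]
  rw [hrest]
  ring

theorem strEq_iff (a : List Char) (s : String) : (String.ofList a == s) = (a == s.toList) := by
  by_cases h : a = s.toList
  · subst h; simp
  · have hne : String.ofList a ≠ s := fun he => h (by rw [← he]; simp)
    simp [h, hne]

-- A's loop can never hit True when the lengths differ
theorem loopA_false (s2 : String) (I : List (Nat × Nat)) (a : List Char)
    (h : a.length ≠ s2.toList.length) : loopA s2 I a = false := by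
  induction I generalizing a with
  | nil => rfl
  | cons p I ih =>
    obtain ⟨i, j⟩ := p
    simp only [loopA]
    have hlen : (if j < a.length then pySwap a i j else a).length = a.length := by
      split <;> simp [pySwap]
    have hne : (String.ofList (if j < a.length then pySwap a i j else a) == s2) = false := by
      rw [strEq_iff]
      apply beq_eq_false_iff_ne.mpr
      intro he
      apply h
      rw [← hlen, he]
    rw [hne]
    simp only [Bool.false_eq_true, if_false]
    exact ih _ (by rw [hlen]; exact h)

-- one step of either loop: the incremental count update matches the join-compare
theorem step_cond (s2 : String) (t : List Char) (hts : t = s2.toList) (n : Nat)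
    (ht : t.length = n) (a : List Char) (ha : a.length = n) :
    (mism0 a t == 0) = (String.ofList a == s2) := by
  rw [strEq_iff, ← hts]
  have hiff := mism0_eq_zero_iff a t (by omega)
  apply Bool.eq_iff_iff.mpr
  simp [hiff]

-- loop 1: B's incremental loop equals A's join-and-compare loop
theorem loop1_eq (s2 : String) (t : List Char) (hts : t = s2.toList) (n : Nat)
    (ht : t.length = n) :
    ∀ (I : List Nat) (a : List Char), a.length = n →
      loopB1 t n I a (mism0 a t) = loopA s2 (I.map (fun i => (i, 2 + i))) a := by
  intro I
  induction I with
  | nil => intro a ha; rfl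
  | cons i I ih =>
    intro a ha
    simp only [List.map_cons, loopB1, loopA, ha]
    by_cases hg : 2 + i < n
    · simp only [hg, if_true]
      have hupd := mism0_pySwap a t n i (2 + i) ha ht (by omega) hg (by omega)
      rw [← hupd]
      have ha' : (pySwap a i (2 + i)).length = n := by rw [length_pySwap]; exact ha
      rw [step_cond s2 t hts n ht _ ha']
      rw [ih _ ha']
    · simp only [hg, if_false]
      rw [step_cond s2 t hts n ht a ha]
      rw [ih a ha]

-- loop 2: every index satisfies 2 ≤ i < n
theorem loop2_eq (s2 : String) (t : List Char) (hts : t = s2.toList) (n : Nat)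
    (ht : t.length = n) :
    ∀ (I : List Nat) (a : List Char), a.length = n → (∀ i ∈ I, 2 ≤ i ∧ i < n) →
      loopB2 t I a (mism0 a t) = loopA s2 (I.map (fun i => (i, i - 2))) a := by
  intro I
  induction I with
  | nil => intro a ha _; rfl
  | cons i I ih =>
    intro a ha hmem
    obtain ⟨hi2, hin⟩ := hmem i (List.mem_cons_self ..)
    simp only [List.map_cons, loopB2, loopA, ha]
    have hg : i - 2 < n := by omega
    simp only [hg, if_true]
    have hupd := mism0_pySwap a t n i (i - 2) ha ht hin (by omega) (by omega)
    rw [← hupd]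
    have ha' : (pySwap a i (i - 2)).length = n := by rw [length_pySwap]; exact ha
    rw [step_cond s2 t hts n ht _ ha']
    rw [ih _ ha' (fun x hx => hmem x (List.mem_cons_of_mem _ hx))]


-- ===== VERDICT (by name: the statement is the Claim_ definition above) =====
theorem strings_with_equal_operations_spec : Claim_equal_strings_with_equal_operations := by
  intro s1 s2 _
  unfold Spec_strings_with_equal_operations
  unfold strings_with_equal_operations strings_with_equal_operations_alt
  by_cases hlen : s2.toList.length = s1.toList.length
  · simp only [hlen, ne_eq]
    rw [← loop1_eq s2 s2.toList rfl s1.toList.length hlen (List.range (s1.toList.length / 2)) s1.toList rfl]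
    have hfd : PySem.Int.floordiv (s1.toList.length : Int) 2 = (s1.toList.length : Int) / 2 :=
      PySem.Int.floordiv_eq_ediv_of_pos (by omega)
    have hmap : (PySem.List.pyRange ((s1.toList.length : Int) - 1)
          (PySem.Int.floordiv (s1.toList.length : Int) 2) (-1)).map (fun x => (x.toNat, x.toNat - 2))
        = ((PySem.List.pyRange ((s1.toList.length : Int) - 1)
          (PySem.Int.floordiv (s1.toList.length : Int) 2) (-1)).map Int.toNat).map (fun i => (i, i - 2)) := by
      rw [List.map_map]; rfl
    rw [hmap]
    rw [← loop2_eq s2 s2.toList rfl s1.toList.length hlen _ s1.toList rfl ?mem]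
    case mem =>
      intro i hi
      obtain ⟨x, hx, rfl⟩ := List.mem_map.mp hi
      have hx' := (PySem.List.mem_pyRange_neg_one).mp hx
      rw [hfd] at hx'
      omega
    simp
  · simp only [ne_eq, hlen, not_false_iff, if_true]
    rw [loopA_false s2 _ s1.toList (fun h => hlen h.symm),
        loopA_false s2 _ s1.toList (fun h => hlen h.symm)]
    simp
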